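-- pv_equiv track=rewrite | github.com/Three-Rivers-Tech/finance_feedback_engine | finance_feedback_engine/utils/product_id.py | asset_pair_to_product_id
-- ===== SOURCE A (Python) =====
-- from typing import Any, Iterable, Optional, Set
--
-- _BASE_TO_PRODUCT_ID: dict[str, str] = {
--     "BTC": "BIP-20DEC30-CDE",
--     "ETH": "ETP-20DEC30-CDE",
--     "SOL": "SLP-20DEC30-CDE",
-- }
--
-- def asset_pair_to_product_id(asset_pair: Any) -> Optional[str]:
--     """Map a canonical asset pair to a Coinbase CFM product ID.
--
--     Examples:
--         "BTCUSD" → "BIP-20DEC30-CDE"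
--         "ETHUSD" → "ETP-20DEC30-CDE"
--         "DOGEUSD" → None
--
--     Returns:
--         Product ID string or None if no mapping exists.
--     """
--     if not asset_pair:
--         return None
--
--     raw = str(asset_pair).strip().upper()
--
--     # Extract base currency: "BTCUSD" → "BTC"
--     for suffix in ("USD", "USDT", "USDC"):
--         if raw.endswith(suffix):
--             base = raw[: -len(suffix)]
--             return _BASE_TO_PRODUCT_ID.get(base)
--
--     return None
-- ===== SOURCE B (Python) =====
-- from typing import Any, Optional
--
-- _BASE_TO_PRODUCT_ID: dict[str, str] = {
--     "BTC": "BIP-20DEC30-CDE",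
--     "ETH": "ETP-20DEC30-CDE",
--     "SOL": "SLP-20DEC30-CDE",
-- }
--
-- # Precomputed: every full pair string -> product ID (each base across the three quote suffixes).
-- _PAIR_TO_PRODUCT_ID: dict[str, str] = {
--     base + suffix: pid
--     for base, pid in _BASE_TO_PRODUCT_ID.items()
--     for suffix in ("USD", "USDT", "USDC")
-- }
--
-- def asset_pair_to_product_id(asset_pair: Any) -> Optional[str]:
--     """Map a canonical asset pair to a Coinbase CFM product ID."""
--     if not asset_pair:
--         return None
--     return _PAIR_TO_PRODUCT_ID.get(str(asset_pair).strip().upper())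
-- ===== Notes on version B (the rewrite author's own statement) =====
-- stated objective: simpler
-- what changed: Replaces the suffix-scanning loop plus base lookup with a single precomputed module-level dict mapping each of the nine full pair strings to its product ID, so the function body is one guarded table lookup.
import Mathlib
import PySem

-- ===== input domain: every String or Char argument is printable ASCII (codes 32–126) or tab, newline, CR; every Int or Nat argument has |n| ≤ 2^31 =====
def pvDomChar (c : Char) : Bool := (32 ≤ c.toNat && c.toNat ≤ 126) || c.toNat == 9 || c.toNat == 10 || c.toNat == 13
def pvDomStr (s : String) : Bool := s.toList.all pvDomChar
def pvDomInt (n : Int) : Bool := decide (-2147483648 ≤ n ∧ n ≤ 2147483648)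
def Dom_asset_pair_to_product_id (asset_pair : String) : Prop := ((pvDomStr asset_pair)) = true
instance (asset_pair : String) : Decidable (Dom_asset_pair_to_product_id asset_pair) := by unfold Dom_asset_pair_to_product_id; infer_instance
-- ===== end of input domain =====

-- B replaces A's suffix-scanning loop with one precomputed full-pair → product-ID table lookup (objective: simpler).

-- ===== PORT A =====
def pvBaseToProductId : PySem.Dict String String :=
  PySem.Dict.ofList
    [("BTC", "BIP-20DEC30-CDE"), ("ETH", "ETP-20DEC30-CDE"), ("SOL", "SLP-20DEC30-CDE")]

-- the `for suffix in ("USD","USDT","USDC")` loop: first matching suffix returns the base lookup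
def pvSuffixScan (raw : String) : List String → Option String
  | [] => none
  | suffix :: rest =>
    if PySem.Str.endswith raw suffix then
      pvBaseToProductId.get? (PySem.Str.slice raw none (some (-(PySem.Str.len suffix : Int))))
    else pvSuffixScan raw rest

def asset_pair_to_product_id (asset_pair : String) : Option String :=
  if asset_pair == "" then none
  else
    let raw := PySem.Str.upper (PySem.Str.strip asset_pair)
    pvSuffixScan raw ["USD", "USDT", "USDC"]

-- ===== PORT B =====
-- the dict comprehension over the shared module-level base table: every full pair string → product ID, base-major, suffixes inner
def pvPairToProductId : PySem.Dict String String :=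
  PySem.Dict.ofList
    (pvBaseToProductId.items.flatMap fun bp =>
      ["USD", "USDT", "USDC"].map fun suffix => (bp.1 ++ suffix, bp.2))

def asset_pair_to_product_id_alt (asset_pair : String) : Option String :=
  if asset_pair == "" then none
  else pvPairToProductId.get? (PySem.Str.upper (PySem.Str.strip asset_pair))

-- ===== PRECONDITION & SPEC =====
def Spec_asset_pair_to_product_id (asset_pair : String) (out : Option String) : Prop := out = asset_pair_to_product_id_alt asset_pair
instance (asset_pair : String) (out : Option String) : Decidable (Spec_asset_pair_to_product_id asset_pair out) := by unfold Spec_asset_pair_to_product_id; infer_instance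

-- ===== CLAIM (what is proved, stated in full; the proofs are below) =====
def Claim_equal_asset_pair_to_product_id : Prop := ∀ (asset_pair : String), Dom_asset_pair_to_product_id asset_pair → Spec_asset_pair_to_product_id asset_pair (asset_pair_to_product_id asset_pair)

-- ===== LEMMAS AND PROOFS =====

theorem pvBase_get_none (b : String) (h1 : b ≠ "BTC") (h2 : b ≠ "ETH") (h3 : b ≠ "SOL") :
    pvBaseToProductId.get? b = none := by
  rw [show pvBaseToProductId = PySem.Dict.mk
        [("BTC", "BIP-20DEC30-CDE"), ("ETH", "ETP-20DEC30-CDE"), ("SOL", "SLP-20DEC30-CDE")]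
      from by decide]
  simp [Ne.symm h1, Ne.symm h2, Ne.symm h3, PySem.Dict.get?]

theorem pvPair_eq_mk : pvPairToProductId = PySem.Dict.mk
    [("BTCUSD", "BIP-20DEC30-CDE"), ("BTCUSDT", "BIP-20DEC30-CDE"), ("BTCUSDC", "BIP-20DEC30-CDE"),
     ("ETHUSD", "ETP-20DEC30-CDE"), ("ETHUSDT", "ETP-20DEC30-CDE"), ("ETHUSDC", "ETP-20DEC30-CDE"),
     ("SOLUSD", "SLP-20DEC30-CDE"), ("SOLUSDT", "SLP-20DEC30-CDE"), ("SOLUSDC", "SLP-20DEC30-CDE")] := by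
  decide

theorem pvPair_get_none (r : String)
    (n1 : r ≠ "BTCUSD") (n2 : r ≠ "BTCUSDT") (n3 : r ≠ "BTCUSDC")
    (n4 : r ≠ "ETHUSD") (n5 : r ≠ "ETHUSDT") (n6 : r ≠ "ETHUSDC")
    (n7 : r ≠ "SOLUSD") (n8 : r ≠ "SOLUSDT") (n9 : r ≠ "SOLUSDC") :
    pvPairToProductId.get? r = none := by
  rw [pvPair_eq_mk]
  simp [Ne.symm n1, Ne.symm n2, Ne.symm n3, Ne.symm n4, Ne.symm n5,
        Ne.symm n6, Ne.symm n7, Ne.symm n8, Ne.symm n9, PySem.Dict.get?]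

-- from `raw.endswith(s)`, exhibit the prefix and identify A's slice `raw[:-len(s)]` with it
theorem pv_endswith_slice (raw s : String) (k : Nat) (hk : 0 < k) (hks : s.toList.length = k)
    (h : PySem.Str.endswith raw s = true) :
    ∃ l, l ++ s.toList = raw.toList ∧
      (PySem.Str.slice raw none (some (-(k : Int)))).toList = l := by
  simp only [PySem.Str.endswith_eq] at h
  rw [PySem.Chars.endswith_iff] at h
  obtain ⟨l, hl⟩ := h
  refine ⟨l, hl, ?_⟩
  rw [PySem.Str.toList_slice, PySem.Chars.slice_eq_listSlice,
      PySem.List.slice_to_neg_natCast raw.toList k hk, ← hl,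
      List.length_append, hks, Nat.add_sub_cancel, List.take_left]

theorem pv_raw_eq (raw base s t : String) (l : List Char)
    (hl : l ++ s.toList = raw.toList) (hsl : base.toList = l)
    (ht : t.toList = base.toList ++ s.toList) : raw = t := by
  apply String.toList_injective
  rw [ht, hsl, hl]

-- one suffix step of A's loop returns none when raw is none of the three pairs for that suffix
theorem pv_step_none (raw s : String) (k : Nat) (hk : 0 < k) (hks : s.toList.length = k)
    (tB tE tS : String)
    (hB : tB.toList = "BTC".toList ++ s.toList)
    (hE : tE.toList = "ETH".toList ++ s.toList)
    (hS : tS.toList = "SOL".toList ++ s.toList)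
    (nB : raw ≠ tB) (nE : raw ≠ tE) (nS : raw ≠ tS)
    (h : PySem.Str.endswith raw s = true) :
    pvBaseToProductId.get? (PySem.Str.slice raw none (some (-(k : Int)))) = none := by
  obtain ⟨l, hl, hsl⟩ := pv_endswith_slice raw s k hk hks h
  apply pvBase_get_none
  · intro hb
    exact nB (pv_raw_eq raw (PySem.Str.slice raw none (some (-(k : Int)))) s tB l hl hsl
      (by rw [hb]; exact hB))
  · intro hb
    exact nE (pv_raw_eq raw (PySem.Str.slice raw none (some (-(k : Int)))) s tE l hl hsl
      (by rw [hb]; exact hE))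
  · intro hb
    exact nS (pv_raw_eq raw (PySem.Str.slice raw none (some (-(k : Int)))) s tS l hl hsl
      (by rw [hb]; exact hS))

theorem pv_core (raw : String) :
    pvSuffixScan raw ["USD", "USDT", "USDC"] = pvPairToProductId.get? raw := by
  by_cases hm : raw = "BTCUSD" ∨ raw = "BTCUSDT" ∨ raw = "BTCUSDC" ∨ raw = "ETHUSD" ∨
      raw = "ETHUSDT" ∨ raw = "ETHUSDC" ∨ raw = "SOLUSD" ∨ raw = "SOLUSDT" ∨ raw = "SOLUSDC"
  · rcases hm with rfl | rfl | rfl | rfl | rfl | rfl | rfl | rfl | rfl <;> decide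
  · simp only [not_or] at hm
    obtain ⟨n1, n2, n3, n4, n5, n6, n7, n8, n9⟩ := hm
    rw [pvPair_get_none raw n1 n2 n3 n4 n5 n6 n7 n8 n9]
    simp only [pvSuffixScan]
    rw [show ((PySem.Str.len "USD" : Int)) = ((3 : Nat) : Int) from by decide,
        show ((PySem.Str.len "USDT" : Int)) = ((4 : Nat) : Int) from by decide,
        show ((PySem.Str.len "USDC" : Int)) = ((4 : Nat) : Int) from by decide]
    by_cases h1 : PySem.Str.endswith raw "USD" = true
    · rw [if_pos h1]
      exact pv_step_none raw "USD" 3 (by omega) (by decide) "BTCUSD" "ETHUSD" "SOLUSD"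
        (by decide) (by decide) (by decide) n1 n4 n7 h1
    · rw [if_neg h1]
      by_cases h2 : PySem.Str.endswith raw "USDT" = true
      · rw [if_pos h2]
        exact pv_step_none raw "USDT" 4 (by omega) (by decide) "BTCUSDT" "ETHUSDT" "SOLUSDT"
          (by decide) (by decide) (by decide) n2 n5 n8 h2
      · rw [if_neg h2]
        by_cases h3 : PySem.Str.endswith raw "USDC" = true
        · rw [if_pos h3]
          exact pv_step_none raw "USDC" 4 (by omega) (by decide) "BTCUSDC" "ETHUSDC" "SOLUSDC"
            (by decide) (by decide) (by decide) n3 n6 n9 h3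
        · rw [if_neg h3]

-- ===== VERDICT (by name: the statement is the Claim_ definition above) =====
theorem asset_pair_to_product_id_spec : Claim_equal_asset_pair_to_product_id := by
  intro asset_pair _
  unfold Spec_asset_pair_to_product_id asset_pair_to_product_id asset_pair_to_product_id_alt
  by_cases h : asset_pair == ""
  · rw [if_pos h, if_pos h]
  · rw [if_neg h, if_neg h]
    exact pv_core _
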